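-- pv_equiv track=rewrite | github.com/srvo/dewey | generate_legacy_todos.py | extract_first_comment
-- ===== SOURCE A (Python) =====
-- def extract_first_comment(output: str) -> str:
--     """Extract the first comment block from aider's output"""
--     lines = []
--     in_comment = False
--     for line in output.splitlines():
--         if line.strip().startswith("# TODO:"):
--             in_comment = True
--             lines.append(line)
--         elif in_comment:
--             if line.startswith("#"):
--                 lines.append(line)
--             else:
--                 break
--     return "\n".join(lines)
-- ===== SOURCE B (Python) =====
-- def extract_first_comment(output: str) -> str:
--     """Extract the first comment block from aider's output"""
--     lines = output.splitlines()
--     tags = "".join(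
--         "T" if l.strip().startswith("# TODO:") else "#" if l.startswith("#") else "."
--         for l in lines
--     )
--     start = tags.find("T")
--     if start == -1:
--         return ""
--     end = tags.find(".", start)
--     if end == -1:
--         end = len(tags)
--     return "\n".join(lines[start:end])
-- ===== Notes on version B (the rewrite author's own statement) =====
-- stated objective: alternative
-- what changed: Instead of a stateful per-line loop, B builds a tag string classifying every line once (TODO marker / hash comment / other), locates the block with two string searches (find of the TODO tag for the start, find of the first other-tag after it for the end) and returns the joined slice lines[start:end].
import Mathlib
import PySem

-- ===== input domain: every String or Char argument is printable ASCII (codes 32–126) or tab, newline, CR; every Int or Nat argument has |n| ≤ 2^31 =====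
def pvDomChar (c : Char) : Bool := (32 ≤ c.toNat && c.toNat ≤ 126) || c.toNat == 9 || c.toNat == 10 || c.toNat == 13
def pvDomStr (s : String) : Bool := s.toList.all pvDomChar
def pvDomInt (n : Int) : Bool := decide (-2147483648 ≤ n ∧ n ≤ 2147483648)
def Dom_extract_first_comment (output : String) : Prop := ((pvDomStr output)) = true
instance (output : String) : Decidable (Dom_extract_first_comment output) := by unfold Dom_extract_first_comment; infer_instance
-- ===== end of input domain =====

-- B replaces A's stateful per-line loop by a tag-string search: classify each line into 'T'/'#'/'.',
-- find the block boundaries with string find, and slice; alternative decomposition, same cost.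

-- ===== PORT A =====
def pvALoop : List String → List String → Bool → List String
  | [], lines, _ => lines
  | l :: rest, lines, in_comment =>
    if PySem.Str.startswith (PySem.Str.strip l) "# TODO:" then pvALoop rest (lines ++ [l]) true
    else if in_comment then
      if PySem.Str.startswith l "#" then pvALoop rest (lines ++ [l]) in_comment
      else lines
    else pvALoop rest lines in_comment

def extract_first_comment (output : String) : String :=
  PySem.Str.join "\n" (pvALoop (PySem.Str.splitlines output) [] false)

-- ===== PORT B =====
-- "T" if l.strip().startswith("# TODO:") else "#" if l.startswith("#") else "."
def pvTag (l : String) : String :=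
  if PySem.Str.startswith (PySem.Str.strip l) "# TODO:" then "T"
  else if PySem.Str.startswith l "#" then "#"
  else "."

def extract_first_comment_alt (output : String) : String :=
  let lines := PySem.Str.splitlines output
  let tags := PySem.Str.join "" (lines.map pvTag)
  let start := PySem.Str.find tags "T"
  if start = -1 then ""
  else
    let e := PySem.Str.findFrom tags "." start
    let e := if e = -1 then PySem.Str.len tags else e
    PySem.Str.join "\n" (PySem.List.slice lines (some start) (some e))

-- ===== PRECONDITION & SPEC =====
def Spec_extract_first_comment (output : String) (out : String) : Prop := out = extract_first_comment_alt output
instance (output : String) (out : String) : Decidable (Spec_extract_first_comment output out) := by unfold Spec_extract_first_comment; infer_instance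

-- ===== CLAIM (what is proved, stated in full; the proofs are below) =====
def Claim_equal_extract_first_comment : Prop := ∀ (output : String), Dom_extract_first_comment output → Spec_extract_first_comment output (extract_first_comment output)

-- ===== LEMMAS AND PROOFS =====

def pvIsTodo (l : String) : Bool := PySem.Str.startswith (PySem.Str.strip l) "# TODO:"
def pvCont (l : String) : Bool := pvIsTodo l || PySem.Str.startswith l "#"
def pvTagc (l : String) : Char := if pvIsTodo l then 'T' else if PySem.Str.startswith l "#" then '#' else '.'

-- once in_comment: the rest of the loop collects exactly takeWhile of the continuation predicate
theorem pvALoop_true (ls acc) :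
    pvALoop ls acc true = acc ++ ls.takeWhile pvCont := by
  induction ls generalizing acc with
  | nil => simp [pvALoop]
  | cons l rest ih =>
    by_cases h1 : PySem.Chars.startswith (PySem.Chars.strip l.toList) ['#', ' ', 'T', 'O', 'D', 'O', ':']
    · simp [pvALoop, pvCont, pvIsTodo, h1, ih]
    · by_cases h2 : PySem.Chars.startswith l.toList ['#']
      · simp [pvALoop, pvCont, pvIsTodo, h1, h2, ih]
      · simp [pvALoop, pvCont, pvIsTodo, h1, h2]

-- before in_comment: the loop skips exactly dropWhile of ¬TODO, then behaves as pvALoop_true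
theorem pvALoop_false (ls acc) :
    pvALoop ls acc false = acc ++ (ls.dropWhile (fun l => !pvIsTodo l)).takeWhile pvCont := by
  induction ls generalizing acc with
  | nil => simp [pvALoop]
  | cons l rest ih =>
    by_cases h1 : PySem.Chars.startswith (PySem.Chars.strip l.toList) ['#', ' ', 'T', 'O', 'D', 'O', ':']
    · simp [pvALoop, pvIsTodo, h1, pvALoop_true, pvCont]
    · simp [pvALoop, pvIsTodo, h1, ih]

theorem pvTag_toList (l : String) : (pvTag l).toList = [pvTagc l] := by
  unfold pvTag pvTagc pvIsTodo
  split_ifs <;> rfl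

-- the tag string, on the char level, is just the per-line classification map
theorem pvTags_toList (ls : List String) :
    (PySem.Str.join "" (ls.map pvTag)).toList = ls.map pvTagc := by
  rw [PySem.Str.toList_join]
  have h : (ls.map pvTag).map String.toList = (ls.map pvTagc).map (fun c => [c]) := by
    simp [List.map_map, Function.comp_def, pvTag_toList]
  rw [h]
  exact PySem.Chars.join_nil_singletons _

-- find of a single character: position = length of the ≠-prefix, or -1 when absent
theorem pvFind_go_single (c : Char) (cs : List Char) (k : Nat) :
    PySem.Chars.find.go [c] cs k =
      if c ∈ cs then ((k + (cs.takeWhile (fun x => x ≠ c)).length : Nat) : Int) else -1 := by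
  induction cs generalizing k with
  | nil => simp [PySem.Chars.find.go]
  | cons x t ih =>
    by_cases hx : x = c
    · subst hx; simp [PySem.Chars.find.go, List.isPrefixOf]
    · have ht : List.takeWhile (fun y => decide (y ≠ c)) (x :: t)
          = x :: List.takeWhile (fun y => decide (y ≠ c)) t := by
        simp [hx]
      have hcx : (c == x) = false := by simp [Ne.symm hx]
      simp only [PySem.Chars.find.go, List.isPrefixOf, hcx, Bool.false_and,
        Bool.false_eq_true, if_false, ih, ht, List.mem_cons, Ne.symm hx, false_or,
        List.length_cons]
      split_ifs with h
      · push_cast; omega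
      · rfl

theorem pvFind_single (c : Char) (cs : List Char) :
    PySem.Chars.find cs [c] =
      if c ∈ cs then (((cs.takeWhile (fun x => x ≠ c)).length : Nat) : Int) else -1 := by
  simpa [PySem.Chars.find] using pvFind_go_single c cs 0

theorem pvDropWhile_eq_drop {α : Type} (P : α → Bool) (xs : List α) :
    xs.dropWhile P = xs.drop (xs.takeWhile P).length := by
  induction xs with
  | nil => rfl
  | cons x t ih => by_cases h : P x <;> simp [h, ih]

theorem pvTake_takeWhile {α : Type} (P : α → Bool) (xs : List α) :
    xs.take (xs.takeWhile P).length = xs.takeWhile P := by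
  induction xs with
  | nil => rfl
  | cons x t ih => by_cases h : P x <;> simp [h, ih]

theorem pvTag_ne_T (l : String) : (decide (pvTagc l ≠ 'T')) = !pvIsTodo l := by
  by_cases h : pvIsTodo l
  · simp [pvTagc, h]
  · simp [pvTagc, h]; split_ifs <;> decide

theorem pvTag_ne_dot (l : String) : (decide (pvTagc l ≠ '.')) = pvCont l := by
  by_cases h : pvIsTodo l
  · simp [pvTagc, pvCont, h]
  · by_cases h2 : PySem.Str.startswith l "#" <;> simp [pvTagc, pvCont, h]

-- ===== VERDICT (by name: the statement is the Claim_ definition above) =====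
set_option maxHeartbeats 1000000 in
theorem extract_first_comment_spec : Claim_equal_extract_first_comment := by
  intro output _
  unfold Spec_extract_first_comment extract_first_comment extract_first_comment_alt
  rw [pvALoop_false]
  simp only [List.nil_append]
  set ls := PySem.Str.splitlines output with hls
  set cs := ls.map pvTagc with hcs
  have htags : (PySem.Str.join "" (ls.map pvTag)).toList = cs := pvTags_toList ls
  have hfindT : PySem.Str.find (PySem.Str.join "" (ls.map pvTag)) "T"
      = if 'T' ∈ cs then (((cs.takeWhile (fun x => x ≠ 'T')).length : Nat) : Int) else -1 := by
    show PySem.Chars.find _ _ = _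
    rw [htags]
    exact pvFind_single 'T' cs
  by_cases hT : 'T' ∈ cs
  · -- a TODO line exists
    rw [hfindT]
    simp only [hT, if_true]
    set p : Nat := (cs.takeWhile (fun x => x ≠ 'T')).length with hp
    rw [if_neg (show ¬((p : Int) = -1) from by omega)]
    -- the prefix length on chars is the prefix length on lines
    have hpl : p = (ls.takeWhile (fun l => !pvIsTodo l)).length := by
      rw [hp, hcs]
      simp only [List.takeWhile_map, Function.comp_def, pvTag_ne_T, List.length_map]
    have hple : p ≤ cs.length := (List.takeWhile_prefix _).length_le
    have hdrop : ls.dropWhile (fun l => !pvIsTodo l) = ls.drop p := by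
      rw [pvDropWhile_eq_drop, hpl]
    have hrest : cs.drop p = (ls.drop p).map pvTagc := by
      rw [hcs, List.map_drop]
    have hfindD : PySem.Str.findFrom (PySem.Str.join "" (ls.map pvTag)) "." (p : Int)
        = if PySem.Chars.find (cs.drop p) ['.'] = -1 then -1
          else (p : Int) + PySem.Chars.find (cs.drop p) ['.'] := by
      show PySem.Chars.findFrom _ _ _ _ = _
      rw [htags]
      exact PySem.Chars.findFrom_natCast cs ['.'] p hple
    rw [hfindD, pvFind_single '.' (cs.drop p)]
    by_cases hD : '.' ∈ cs.drop p
    · -- the block ends before the end of the text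
      simp only [hD, if_true]
      set q : Nat := ((cs.drop p).takeWhile (fun x => x ≠ '.')).length with hq
      rw [if_neg (by omega), if_neg (by omega), PySem.List.slice_natCast_add]
      have hql : q = ((ls.drop p).takeWhile pvCont).length := by
        rw [hq, hrest]
        simp only [List.takeWhile_map, Function.comp_def, pvTag_ne_dot, List.length_map]
      rw [hdrop, hql, pvTake_takeWhile]
    · -- no non-comment line after the block: it runs to the end
      rw [if_neg hD, if_pos rfl, if_pos rfl]
      have hlen : PySem.Str.len (PySem.Str.join "" (ls.map pvTag)) = (ls.length : Int) := by
        show ((PySem.Str.join "" (ls.map pvTag)).toList.length : Int) = _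
        rw [htags, hcs, List.length_map]
      rw [hlen]
      have hcast : ((ls.length : Nat) : Int) = (ls.length : Int) := rfl
      rw [← hcast, PySem.List.slice_natCast]
      have hall : ∀ x ∈ ls.drop p, pvCont x = true := by
        intro x hx
        have hne : pvTagc x ≠ '.' := fun hc =>
          hD (by rw [hrest]; exact hc ▸ List.mem_map_of_mem hx)
        rw [← pvTag_ne_dot x]
        simpa using hne
      rw [hdrop, List.takeWhile_eq_self_iff.mpr hall]
      exact congrArg _ (List.take_of_length_le (by simp [List.length_drop])).symm
  · -- no TODO line at all: A's dropWhile consumes everything, B finds no 'T'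
    rw [hfindT]
    simp only [hT, if_false]
    have : ls.dropWhile (fun l => !pvIsTodo l) = [] := by
      rw [List.dropWhile_eq_nil_iff]
      intro x hx
      have : pvTagc x ≠ 'T' := fun hc => hT (by rw [hcs]; exact hc ▸ List.mem_map_of_mem hx)
      have h := pvTag_ne_T x
      simp [this] at h
      simp [← h]
    rw [this]
    rfl
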